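-- pv_equiv track=rewrite | github.com/Andrei-00/UMT | main.py | nr_of_rectangles
-- ===== SOURCE A (Python) =====
-- def nr_of_rectangles(points):
--     # Initialize the variable for counting the rectangles
--     nr = 0
--
--     # Iterate through all the points twice by using a nested for loop
--     # x1, y1 will be the upper left corner and x4, y4 the bottom right corner
--     for x1, y1 in points:
--         for x4, y4 in points:
--             # Check if the upper right and lower left corner exist in order to form a rectangle
--             x2, y2 = (x1, y4)  # Upper right corner
--             x3, y3 = (x4, y1)  # Lower left corner
--             # Check if points are valid
--             if x1 == x4 or y1 == y4 or x1 > x4 or y1 > y4: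
--                 continue
--             # Check if these points exist
--             if points.get((x2, y2)) is not None and points.get((x3, y3)) is not None:
--                 # Increase the count
--                 nr = nr + 1
--     return nr
-- ===== SOURCE B (Python) =====
-- def nr_of_rectangles(points):
--     # Group the point set by row: y-coordinate -> set of x-coordinates in that row.
--     rows = {}
--     for x, y in points:
--         rows.setdefault(y, set()).add(x)
--     xsets = list(rows.values())
--     # Every unordered pair of rows sharing k columns spans C(k, 2) rectangles.
--     total = 0
--     for i, s in enumerate(xsets):
--         for t in xsets[i + 1:]:
--             shared = len(s & t)
--             total += shared * (shared - 1) // 2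
--     return total
-- ===== Notes on version B (the rewrite author's own statement) =====
-- stated objective: faster
-- what changed: A tests every ordered pair of points for being opposite rectangle corners with two dict lookups each; B groups the points into rows (y -> set of x-coordinates) in one pass and, for each unordered pair of rows, adds C(shared_columns, 2), counting each rectangle exactly once.
import Mathlib
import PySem

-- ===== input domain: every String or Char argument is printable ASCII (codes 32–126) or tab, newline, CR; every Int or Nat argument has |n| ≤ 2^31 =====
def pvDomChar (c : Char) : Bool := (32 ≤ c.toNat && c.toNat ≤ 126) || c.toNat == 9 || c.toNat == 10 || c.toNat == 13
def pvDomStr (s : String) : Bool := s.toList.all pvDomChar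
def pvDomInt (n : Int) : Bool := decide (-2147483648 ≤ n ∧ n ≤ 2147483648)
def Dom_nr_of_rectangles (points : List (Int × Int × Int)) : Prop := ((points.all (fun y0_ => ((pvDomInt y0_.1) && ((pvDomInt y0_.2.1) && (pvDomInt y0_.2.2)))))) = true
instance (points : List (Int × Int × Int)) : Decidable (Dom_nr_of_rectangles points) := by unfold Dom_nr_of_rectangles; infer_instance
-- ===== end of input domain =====

-- B replaces A's quadratic scan over all ordered point pairs by grouping the points
-- into rows (y -> set of x) and summing C(shared columns, 2) over unordered row pairs.

-- ===== PORT A =====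
-- 'points' is the dict {(x, y): value}: each list element is (x, y, value); iteration
-- runs over the distinct keys in first-insertion order, as Python dict iteration does.
def nr_of_rectangles (points : List (Int × Int × Int)) : Int :=
  let d : PySem.Dict (Int × Int) Int :=
    PySem.Dict.ofList (points.map (fun p => ((p.1, p.2.1), p.2.2)))
  d.keys.foldl (fun nr p1 =>
    d.keys.foldl (fun nr p4 =>
      -- if x1 == x4 or y1 == y4 or x1 > x4 or y1 > y4: continue
      if p1.1 == p4.1 || p1.2 == p4.2 || decide (p1.1 > p4.1) || decide (p1.2 > p4.2) then nr
      -- if points.get((x1, y4)) is not None and points.get((x4, y1)) is not None: nr = nr + 1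
      else if (d.get? (p1.1, p4.2)).isSome && (d.get? (p4.1, p1.2)).isSome then nr + 1
      else nr) nr) 0

-- ===== PORT B =====
-- shared * (shared - 1) // 2
def pvC2 (k : Int) : Int := PySem.Int.floordiv (k * (k - 1)) 2

-- 'for i, s in enumerate(xsets): for t in xsets[i+1:]: total += C2(len(s & t))'
def pvPairsLoop (total : Int) : List (PySem.Set Int) → Int
  | [] => total
  | s :: rest =>
      pvPairsLoop
        (rest.foldl (fun acc t => acc + pvC2 (PySem.Set.len (PySem.Set.inter s t))) total) rest

def nr_of_rectangles_alt (points : List (Int × Int × Int)) : Int :=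
  -- for x, y in points: rows.setdefault(y, set()).add(x)   (iterating the dict's keys)
  let keys : List (Int × Int) := PySem.List.dedup (points.map (fun p => (p.1, p.2.1)))
  let rows : PySem.Dict Int (PySem.Set Int) :=
    keys.foldl (fun d p => d.modify p.2 PySem.Set.empty (fun s => PySem.Set.add s p.1))
      PySem.Dict.empty
  pvPairsLoop 0 rows.values

-- ===== PRECONDITION & SPEC =====
def Spec_nr_of_rectangles (points : List (Int × Int × Int)) (out : Int) : Prop := out = nr_of_rectangles_alt points
instance (points : List (Int × Int × Int)) (out : Int) : Decidable (Spec_nr_of_rectangles points out) := by unfold Spec_nr_of_rectangles; infer_instance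

-- ===== CLAIM (what is proved, stated in full; the proofs are below) =====
def Claim_equal_nr_of_rectangles : Prop := ∀ (points : List (Int × Int × Int)), Dom_nr_of_rectangles points → Spec_nr_of_rectangles points (nr_of_rectangles points)

-- ===== LEMMAS AND PROOFS =====

-- the deduplicated key list both ports iterate over
def pvK (points : List (Int × Int × Int)) : List (Int × Int) :=
  PySem.List.dedup (points.map (fun p => (p.1, p.2.1)))

-- the distinct rows (y-coordinates), in first-insertion order
def pvY (K : List (Int × Int)) : List Int := PySem.List.dedup (K.map Prod.snd)

-- the x-coordinates present in row y (distinct when K is)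
def pvXl (K : List (Int × Int)) (y : Int) : List Int :=
  (K.filter (fun p => p.2 == y)).map Prod.fst

-- indicator of A's counting condition
def pvIndK (K : List (Int × Int)) (p1 p4 : Int × Int) : Int :=
  if p1.1 < p4.1 ∧ p1.2 < p4.2 ∧ (p1.1, p4.2) ∈ K ∧ (p4.1, p1.2) ∈ K then 1 else 0

-- sum form of B's pair loop
def pvPairsSum : List (PySem.Set Int) → Int
  | [] => 0
  | s :: rest =>
      (rest.map (fun t => pvC2 (PySem.Set.len (PySem.Set.inter s t)))).sum + pvPairsSum rest

lemma pvK_nodup (points : List (Int × Int × Int)) : (pvK points).Nodup := by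
  simp [pvK, PySem.List.dedup_eq_ofList, PySem.Set.nodup_ofList]

lemma pvXl_nodup (K : List (Int × Int)) (hK : K.Nodup) (y : Int) : (pvXl K y).Nodup := by
  apply (hK.filter _).map_on
  intro a ha b hb hab
  simp only [List.mem_filter, beq_iff_eq] at ha hb
  exact Prod.ext hab (ha.2.trans hb.2.symm)

lemma mem_pvXl (K : List (Int × Int)) (y a : Int) : a ∈ pvXl K y ↔ (a, y) ∈ K := by
  simp only [pvXl, List.mem_map, List.mem_filter, beq_iff_eq]
  constructor
  · rintro ⟨p, ⟨hp, hy⟩, ha⟩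
    cases p; simp_all
  · intro h; exact ⟨(a, y), ⟨h, rfl⟩, rfl⟩

lemma keysA (points : List (Int × Int × Int)) :
    (PySem.Dict.ofList (points.map (fun p => ((p.1, p.2.1), p.2.2)))).keys = pvK points := by
  show ((points.map (fun p => ((p.1, p.2.1), p.2.2))).foldl
      (fun d p => d.insert p.1 p.2) PySem.Dict.empty).keys = pvK points
  rw [PySem.Dict.keys_foldl_insert_key _ Prod.fst (fun _ p => p.2)]
  simp [pvK, PySem.Set.update_nil_left, PySem.List.dedup_eq_ofList, List.map_map, Function.comp_def]

lemma memA (points : List (Int × Int × Int)) (q : Int × Int) :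
    ((PySem.Dict.ofList (points.map (fun p => ((p.1, p.2.1), p.2.2)))).get? q).isSome = true
      ↔ q ∈ pvK points := by
  rw [← PySem.Dict.contains_eq_isSome_get?, PySem.Dict.contains_iff_mem_keys, keysA]

-- A's nested fold is the double sum of the indicator over the key set
lemma portA_eq_sum (points : List (Int × Int × Int)) :
    nr_of_rectangles points =
      ∑ p1 ∈ (pvK points).toFinset, ∑ p4 ∈ (pvK points).toFinset,
        pvIndK (pvK points) p1 p4 := by
  simp only [nr_of_rectangles]
  rw [keysA]
  have hstep : ∀ p1 p4 : Int × Int, ∀ nr : Int,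
      (if p1.1 == p4.1 || p1.2 == p4.2 || decide (p1.1 > p4.1) || decide (p1.2 > p4.2) then nr
       else if ((PySem.Dict.ofList (points.map (fun p => ((p.1, p.2.1), p.2.2)))).get?
              (p1.1, p4.2)).isSome
            && ((PySem.Dict.ofList (points.map (fun p => ((p.1, p.2.1), p.2.2)))).get?
              (p4.1, p1.2)).isSome then nr + 1
       else nr) = nr + pvIndK (pvK points) p1 p4 := by
    intro p1 p4 nr
    obtain ⟨x1, y1⟩ := p1
    obtain ⟨x4, y4⟩ := p4
    unfold pvIndK
    by_cases hg : (x1 == x4 || y1 == y4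
        || decide (x1 > x4) || decide (y1 > y4)) = true
    · rw [if_pos hg, if_neg, add_zero]
      simp only [Bool.or_eq_true, beq_iff_eq, decide_eq_true_eq] at hg
      rintro ⟨ha, hb, -, -⟩
      rcases hg with ((h | h) | h) | h <;> omega
    · rw [if_neg hg]
      simp only [Bool.or_eq_true, beq_iff_eq, decide_eq_true_eq, not_or, not_lt] at hg
      obtain ⟨⟨⟨h1, h2⟩, h3⟩, h4⟩ := hg
      by_cases hc : (((PySem.Dict.ofList (points.map (fun p => ((p.1, p.2.1), p.2.2)))).get?
              (x1, y4)).isSome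
            && ((PySem.Dict.ofList (points.map (fun p => ((p.1, p.2.1), p.2.2)))).get?
              (x4, y1)).isSome) = true
      · rw [if_pos hc, if_pos]
        simp only [Bool.and_eq_true, memA] at hc
        exact ⟨by omega, by omega, hc.1, hc.2⟩
      · rw [if_neg hc, if_neg, add_zero]
        simp only [Bool.and_eq_true, memA, not_and] at hc
        rintro ⟨-, -, ha, hb⟩
        exact hc ha hb
  have hfold : ∀ (init : Int), ∀ p1 : Int × Int,
      ((pvK points).foldl (fun nr p4 =>
        if p1.1 == p4.1 || p1.2 == p4.2 || decide (p1.1 > p4.1) || decide (p1.2 > p4.2) then nr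
        else if ((PySem.Dict.ofList (points.map (fun p => ((p.1, p.2.1), p.2.2)))).get?
              (p1.1, p4.2)).isSome
            && ((PySem.Dict.ofList (points.map (fun p => ((p.1, p.2.1), p.2.2)))).get?
              (p4.1, p1.2)).isSome then nr + 1 else nr) init)
      = init + ((pvK points).map (pvIndK (pvK points) p1)).sum := by
    intro init p1
    rw [List.foldl_ext _ (fun nr p4 => nr + pvIndK (pvK points) p1 p4) init
      (fun nr p4 _ => hstep p1 p4 nr)]
    exact PySem.List.foldl_add _ _ init
  rw [List.foldl_ext _ (fun nr p1 => nr + ((pvK points).map (pvIndK (pvK points) p1)).sum) 0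
    (fun nr p1 _ => hfold nr p1)]
  rw [PySem.List.foldl_add, zero_add, ← List.sum_toFinset _ (pvK_nodup points)]
  exact Finset.sum_congr rfl fun p1 _ => (List.sum_toFinset _ (pvK_nodup points)).symm

-- characterisation of B's grouping fold
lemma rows_getD (K : List (Int × Int)) (d : PySem.Dict Int (PySem.Set Int)) (y : Int) :
    (K.foldl (fun d p => d.modify p.2 PySem.Set.empty (fun s => PySem.Set.add s p.1)) d).getD y
        PySem.Set.empty
      = (K.filter (fun p => p.2 == y)).foldl (fun s p => PySem.Set.add s p.1)
          (d.getD y PySem.Set.empty) := by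
  induction K generalizing d with
  | nil => simp
  | cons p K' ih =>
      simp only [List.foldl_cons, List.filter_cons]
      rw [ih]
      by_cases hy : p.2 = y
      · simp only [hy, beq_self_eq_true, if_pos, List.foldl_cons]
        rw [PySem.Dict.getD_modify, if_pos rfl]
      · rw [if_neg (by simpa using hy)]
        rw [PySem.Dict.getD_modify, if_neg (Ne.symm hy)]

-- B's port equals the pair loop over the row lists
lemma portB_eq_pairs (points : List (Int × Int × Int)) :
    nr_of_rectangles_alt points
      = pvPairsLoop 0 ((pvY (pvK points)).map (fun y => pvXl (pvK points) y)) := by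
  simp only [nr_of_rectangles_alt]
  rw [show PySem.List.dedup (List.map (fun p => (p.1, p.2.1)) points) = pvK points from rfl]
  have hkeys : ((pvK points).foldl
      (fun d p => d.modify p.2 PySem.Set.empty (fun s => PySem.Set.add s p.1))
      PySem.Dict.empty).keys = pvY (pvK points) := by
    rw [PySem.Dict.keys_foldl_modify_key _ Prod.snd PySem.Set.empty
      (fun d p s => PySem.Set.add s p.1) PySem.Dict.empty]
    simp [pvY, PySem.Set.update_nil_left, PySem.List.dedup_eq_ofList]
  have hnd : ((pvK points).foldl
      (fun d p => d.modify p.2 PySem.Set.empty (fun s => PySem.Set.add s p.1))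
      PySem.Dict.empty).keys.Nodup := by
    rw [hkeys]; simp [pvY, PySem.List.dedup_eq_ofList, PySem.Set.nodup_ofList]
  rw [PySem.Dict.values_eq_map_keys _ hnd PySem.Set.empty, hkeys]
  congr 1
  refine List.map_congr_left fun y hy => ?_
  rw [rows_getD]
  have : ((pvK points).filter (fun p => p.2 == y)).foldl (fun s p => PySem.Set.add s p.1)
      (PySem.Dict.empty.getD y PySem.Set.empty)
      = PySem.Set.update (PySem.Dict.empty.getD y PySem.Set.empty)
          (((pvK points).filter (fun p => p.2 == y)).map Prod.fst) := by
    rw [PySem.Set.update_map_eq_foldl_add]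
  rw [this]
  have hempty : (PySem.Dict.empty (κ := Int) (ν := PySem.Set Int)).getD y PySem.Set.empty
      = PySem.Set.empty := by simp [PySem.Dict.getD_empty]
  rw [hempty]
  show PySem.Set.update [] _ = _
  rw [PySem.Set.update_nil_left]
  exact PySem.Set.ofList_eq_self_of_nodup _ (pvXl_nodup _ (pvK_nodup points) y)

lemma pairsLoop_eq_sum (L : List (PySem.Set Int)) (t : Int) :
    pvPairsLoop t L = t + pvPairsSum L := by
  induction L generalizing t with
  | nil => simp [pvPairsLoop, pvPairsSum]
  | cons s rest ih =>
      simp only [pvPairsLoop, pvPairsSum, ih, PySem.List.foldl_add]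
      ring

lemma len_inter_toFinset (A B : List Int) (hA : A.Nodup) :
    PySem.Set.len (PySem.Set.inter A B) = ((A.toFinset ∩ B.toFinset).card : Int) := by
  have h1 : (PySem.Set.inter A B).toFinset = A.toFinset ∩ B.toFinset := by
    ext x; simp [PySem.Set.mem_inter]
  have h2 : (PySem.Set.inter A B).Nodup := PySem.Set.nodup_inter _ _ hA
  have : PySem.Set.len (PySem.Set.inter A B) = ((PySem.Set.inter A B).length : Int) := rfl
  rw [this, ← List.toFinset_card_of_nodup h2, h1]

-- the pair loop over a nodup list as a double Finset sum
lemma pairsSum_toFinset (f : Int → PySem.Set Int)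
    (hsym : ∀ r s, pvC2 (PySem.Set.len (PySem.Set.inter (f r) (f s)))
                 = pvC2 (PySem.Set.len (PySem.Set.inter (f s) (f r))))
    (Y : List Int) (hY : Y.Nodup) :
    pvPairsSum (Y.map f)
      = ∑ r ∈ Y.toFinset, ∑ s ∈ Y.toFinset,
          if r < s then pvC2 (PySem.Set.len (PySem.Set.inter (f r) (f s))) else 0 := by
  induction Y with
  | nil => simp [pvPairsSum]
  | cons y Y' ih =>
      obtain ⟨hy, hY'⟩ := List.nodup_cons.mp hY
      have hyF : y ∉ Y'.toFinset := by simpa using hy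
      have g : Int → Int → Int := fun r s => pvC2 (PySem.Set.len (PySem.Set.inter (f r) (f s)))
      simp only [List.map_cons, pvPairsSum, List.toFinset_cons]
      rw [Finset.sum_insert hyF, ih hY']
      have hinner : ∀ r, ∑ s ∈ insert y Y'.toFinset,
          (if r < s then pvC2 (PySem.Set.len (PySem.Set.inter (f r) (f s))) else 0)
          = (if r < y then pvC2 (PySem.Set.len (PySem.Set.inter (f r) (f y))) else 0)
            + ∑ s ∈ Y'.toFinset,
              (if r < s then pvC2 (PySem.Set.len (PySem.Set.inter (f r) (f s))) else 0) := by
        intro r; rw [Finset.sum_insert hyF]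
      rw [hinner y, if_neg (lt_irrefl y), zero_add]
      have hsplit : ∑ r ∈ Y'.toFinset, ∑ s ∈ insert y Y'.toFinset,
          (if r < s then pvC2 (PySem.Set.len (PySem.Set.inter (f r) (f s))) else 0)
          = (∑ r ∈ Y'.toFinset,
              (if r < y then pvC2 (PySem.Set.len (PySem.Set.inter (f r) (f y))) else 0))
            + ∑ r ∈ Y'.toFinset, ∑ s ∈ Y'.toFinset,
              (if r < s then pvC2 (PySem.Set.len (PySem.Set.inter (f r) (f s))) else 0) := by
        rw [← Finset.sum_add_distrib]
        exact Finset.sum_congr rfl fun r _ => hinner r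
      rw [hsplit]
      have hmerge : (List.map (fun t => pvC2 (PySem.Set.len (PySem.Set.inter (f y) t))) (Y'.map f)).sum
          = (∑ s ∈ Y'.toFinset, (if y < s then pvC2 (PySem.Set.len (PySem.Set.inter (f y) (f s))) else 0))
            + ∑ r ∈ Y'.toFinset, (if r < y then pvC2 (PySem.Set.len (PySem.Set.inter (f r) (f y))) else 0) := by
        rw [List.map_map, ← List.sum_toFinset _ hY', ← Finset.sum_add_distrib]
        refine Finset.sum_congr rfl fun s hs => ?_
        have hne : y ≠ s := fun h => hy (h ▸ (List.mem_toFinset.mp hs))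
        rcases lt_or_gt_of_ne hne with h | h
        · simp [h, not_lt.mpr h.le, Function.comp]
        · simp only [Function.comp, if_pos h, if_neg (not_lt.mpr h.le), zero_add]
          exact hsym y s
      rw [hmerge]
      ring

-- counting strictly increasing pairs in a finite set of integers
lemma count_lt_pairs (T : Finset Int) :
    (∑ a ∈ T, ∑ b ∈ T, if a < b then (1 : Int) else 0) = pvC2 (T.card : Int) := by
  have hLHS : (∑ a ∈ T, ∑ b ∈ T, if a < b then (1 : Int) else 0)
      = ((∑ a ∈ T, (T.filter (fun b => a < b)).card : ℕ) : Int) := by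
    push_cast
    refine Finset.sum_congr rfl fun a _ => ?_
    rw [Finset.sum_boole]
  have hswap : (∑ a ∈ T, (T.filter (fun b => b < a)).card)
      = ∑ a ∈ T, (T.filter (fun b => a < b)).card := by
    simp only [Finset.card_filter]
    rw [Finset.sum_comm]
  have key : ∀ a ∈ T, (T.filter (fun b => a < b)).card + (T.filter (fun b => b < a)).card
      = T.card - 1 := by
    intro a ha
    have hdisj : Disjoint (T.filter (fun b => a < b)) (T.filter (fun b => b < a)) :=
      Finset.disjoint_filter.2 fun b _ h1 h2 => absurd h2 (not_lt.mpr h1.le)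
    have hunion : T.filter (fun b => a < b) ∪ T.filter (fun b => b < a) = T.erase a := by
      rw [← Finset.filter_or]
      ext b
      simp [Finset.mem_erase, lt_or_lt_iff_ne, ne_comm, and_comm]
    rw [← Finset.card_union_of_disjoint hdisj, hunion, Finset.card_erase_of_mem ha]
  have h2 : 2 * (∑ a ∈ T, (T.filter (fun b => a < b)).card) = T.card * (T.card - 1) := by
    rw [two_mul]
    nth_rewrite 2 [← hswap]
    rw [← Finset.sum_add_distrib, Finset.sum_congr rfl key, Finset.sum_const, smul_eq_mul]
  rw [hLHS]
  have hcast : ((T.card : Int) * ((T.card : Int) - 1))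
      = 2 * ((∑ a ∈ T, (T.filter (fun b => a < b)).card : ℕ) : Int) := by
    rcases Nat.eq_zero_or_pos T.card with hc | hc
    · rw [hc] at h2
      have h0 : (∑ a ∈ T, (T.filter (fun b => a < b)).card) = 0 := by omega
      rw [h0, hc]; ring
    · obtain ⟨m, hm⟩ : ∃ m, T.card = m + 1 := ⟨T.card - 1, by omega⟩
      rw [hm] at h2 ⊢
      have : (2 : Int) * ((∑ a ∈ T, (T.filter (fun b => a < b)).card : ℕ) : Int)
          = ((m : Int) + 1) * m := by exact_mod_cast congrArg (Nat.cast : ℕ → ℤ) (by simpa using h2)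
      rw [this]; push_cast; ring
  unfold pvC2
  rw [hcast, PySem.Int.floordiv_eq_ediv_of_pos (by norm_num), Int.mul_ediv_cancel_left _ (by norm_num)]

-- partitioning a sum over the key set by rows
lemma fiber_sum (K : List (Int × Int)) (F : Int × Int → Int) :
    (∑ p ∈ K.toFinset, F p)
      = ∑ y ∈ (pvY K).toFinset, ∑ a ∈ (pvXl K y).toFinset, F (a, y) := by
  have hmaps : ∀ p ∈ K.toFinset, p.2 ∈ (pvY K).toFinset := by
    intro p hp
    simp only [pvY, List.mem_toFinset, PySem.List.dedup_eq_ofList, PySem.Set.mem_ofList] at *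
    exact List.mem_map_of_mem hp
  rw [← Finset.sum_fiberwise_of_maps_to hmaps F]
  refine Finset.sum_congr rfl fun y _ => ?_
  have himg : K.toFinset.filter (fun p => p.2 = y)
      = (pvXl K y).toFinset.image (fun a => (a, y)) := by
    ext p
    simp only [Finset.mem_filter, Finset.mem_image, List.mem_toFinset, mem_pvXl]
    constructor
    · rintro ⟨hp, hy⟩
      obtain ⟨a, b⟩ := p
      cases hy
      exact ⟨a, hp, rfl⟩
    · rintro ⟨a, ha, rfl⟩
      exact ⟨ha, rfl⟩
  rw [himg, Finset.sum_image (fun a _ b _ hab => (Prod.mk.injEq _ _ _ _ ▸ hab).1)]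

-- the inner double sum for a fixed pair of rows
lemma middle (K : List (Int × Int)) (hK : K.Nodup) (r s : Int) :
    (∑ a ∈ (pvXl K r).toFinset, ∑ b ∈ (pvXl K s).toFinset, pvIndK K (a, r) (b, s))
      = if r < s then pvC2 (PySem.Set.len (PySem.Set.inter (pvXl K r) (pvXl K s))) else 0 := by
  by_cases hrs : r < s
  · rw [if_pos hrs]
    have hpt : ∀ a b : Int, pvIndK K (a, r) (b, s)
        = if a ∈ (pvXl K s).toFinset then
            (if b ∈ (pvXl K r).toFinset then (if a < b then (1 : Int) else 0) else 0)
          else 0 := by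
      intro a b
      unfold pvIndK
      simp only [List.mem_toFinset, mem_pvXl]
      split_ifs <;> tauto
    calc (∑ a ∈ (pvXl K r).toFinset, ∑ b ∈ (pvXl K s).toFinset, pvIndK K (a, r) (b, s))
        = ∑ a ∈ (pvXl K r).toFinset, if a ∈ (pvXl K s).toFinset then
            (∑ b ∈ (pvXl K s).toFinset, if b ∈ (pvXl K r).toFinset then
              (if a < b then (1 : Int) else 0) else 0) else 0 := by
          refine Finset.sum_congr rfl fun a _ => ?_
          by_cases ha : a ∈ (pvXl K s).toFinset
          · rw [if_pos ha]
            exact Finset.sum_congr rfl fun b _ => by rw [hpt, if_pos ha]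
          · rw [if_neg ha]
            rw [Finset.sum_eq_zero fun b _ => by rw [hpt, if_neg ha]]
      _ = ∑ a ∈ (pvXl K r).toFinset ∩ (pvXl K s).toFinset,
            ∑ b ∈ (pvXl K s).toFinset ∩ (pvXl K r).toFinset, if a < b then (1 : Int) else 0 := by
          rw [← Finset.sum_filter, Finset.filter_mem_eq_inter]
          exact Finset.sum_congr rfl fun a _ => by
            rw [← Finset.sum_filter, Finset.filter_mem_eq_inter]
      _ = pvC2 (PySem.Set.len (PySem.Set.inter (pvXl K r) (pvXl K s))) := by
          rw [Finset.inter_comm ((pvXl K s).toFinset), count_lt_pairs,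
            len_inter_toFinset _ _ (pvXl_nodup K hK r)]
  · rw [if_neg hrs]
    refine Finset.sum_eq_zero fun a _ => Finset.sum_eq_zero fun b _ => ?_
    simp [pvIndK, hrs]

-- the core combinatorial identity
lemma core (K : List (Int × Int)) (hK : K.Nodup) :
    (∑ p1 ∈ K.toFinset, ∑ p4 ∈ K.toFinset, pvIndK K p1 p4)
      = ∑ r ∈ (pvY K).toFinset, ∑ s ∈ (pvY K).toFinset,
          if r < s then pvC2 (PySem.Set.len (PySem.Set.inter (pvXl K r) (pvXl K s))) else 0 := by
  rw [fiber_sum K (fun p1 => ∑ p4 ∈ K.toFinset, pvIndK K p1 p4)]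
  refine Finset.sum_congr rfl fun r _ => ?_
  calc (∑ a ∈ (pvXl K r).toFinset, ∑ p4 ∈ K.toFinset, pvIndK K (a, r) p4)
      = ∑ a ∈ (pvXl K r).toFinset, ∑ s ∈ (pvY K).toFinset, ∑ b ∈ (pvXl K s).toFinset,
          pvIndK K (a, r) (b, s) := by
        exact Finset.sum_congr rfl fun a _ => fiber_sum K (fun p4 => pvIndK K (a, r) p4)
    _ = ∑ s ∈ (pvY K).toFinset, ∑ a ∈ (pvXl K r).toFinset, ∑ b ∈ (pvXl K s).toFinset,
          pvIndK K (a, r) (b, s) := Finset.sum_comm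
    _ = ∑ s ∈ (pvY K).toFinset,
          if r < s then pvC2 (PySem.Set.len (PySem.Set.inter (pvXl K r) (pvXl K s))) else 0 :=
        Finset.sum_congr rfl fun s _ => middle K hK r s

-- ===== VERDICT (by name: the statement is the Claim_ definition above) =====
theorem nr_of_rectangles_spec : Claim_equal_nr_of_rectangles := by
  intro points _
  unfold Spec_nr_of_rectangles
  rw [portA_eq_sum, portB_eq_pairs, pairsLoop_eq_sum, zero_add,
    pairsSum_toFinset _ (fun r s => by
      rw [len_inter_toFinset _ _ (pvXl_nodup _ (pvK_nodup points) r),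
        len_inter_toFinset _ _ (pvXl_nodup _ (pvK_nodup points) s), Finset.inter_comm])
      _ (by simp [pvY, PySem.List.dedup_eq_ofList, PySem.Set.nodup_ofList]),
    core _ (pvK_nodup points)]
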